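-- pv_equiv track=rewrite | github.com/max-hh-26/hollyhock-eos-2025 | generate_pdf.py | parse_custom
-- ===== SOURCE A (Python) =====
-- def parse_custom(cell_value, standard_set):
--     """Return write-in responses that are not in the standard option set."""
--     if not cell_value or not cell_value.strip():
--         return []
--     parts = [p.strip() for p in cell_value.split(',')]
--     custom = []
--     buf = ''
--     for part in parts:
--         candidate = (buf + ', ' + part).strip(', ') if buf else part
--         # Check if candidate or any standard option starts with it
--         matched = any(
--             s.lower() == candidate.lower() or
--             s.lower().startswith(candidate.lower() + ',')
--             for s in standard_set
--         )
--         in_standard = any(s.lower() == candidate.lower() for s in standard_set)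
--         partial_match = any(
--             s.lower().startswith(candidate.lower())
--             for s in standard_set
--         )
--         if in_standard:
--             buf = ''
--         elif partial_match:
--             buf = candidate
--         else:
--             # Not a standard option — it's custom
--             if buf:
--                 custom.append(buf)
--             buf = ''
--             # Check if this part alone is standard
--             if any(s.lower() == part.lower() for s in standard_set):
--                 pass
--             else:
--                 buf = part
--     if buf:
--         custom.append(buf)
--     return [c for c in custom if len(c) > 2]
-- ===== SOURCE B (Python) =====
-- def parse_custom(cell_value, standard_set):
--     """Return write-in responses that are not in the standard option set."""
--     if not cell_value or not cell_value.strip():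
--         return []
--     options = [s.lower() for s in standard_set]
--     out = []
--     # Incremental pruning: `live` is always the sublist of options that start
--     # with the current candidate, so growing a candidate only rescans the
--     # survivors of the previous step instead of the whole option list.
--     cand, live = '', options
--     for part in (p.strip() for p in cell_value.split(',')):
--         joined = (cand + ', ' + part).strip(', ') if cand else part
--         j = joined.lower()
--         survivors = [o for o in live if o.startswith(j)]
--         if j in survivors:          # an exact match always survives its own filter
--             cand, live = '', options
--         elif survivors:
--             cand, live = joined, survivors
--         else:
--             if len(cand) > 2:       # flush: emit already length-filtered
--                 out.append(cand)
--             if part.lower() in options: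
--                 cand, live = '', options
--             else:
--                 pl = part.lower()
--                 cand, live = part, [o for o in options if o.startswith(pl)]
--     if len(cand) > 2:
--         out.append(cand)
--     return out
-- ===== Notes on version B (the rewrite author's own statement) =====
-- stated objective: faster
-- what changed: B maintains the shrinking 'survivors' list of options that still start with the current candidate, so extending a candidate rescans only the previous survivors instead of the whole option list (incremental pruning), the exact-match test runs inside the survivors, the len>2 filter is fused into the flush, and A's dead 'matched' scan is dropped.
import Mathlib
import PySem

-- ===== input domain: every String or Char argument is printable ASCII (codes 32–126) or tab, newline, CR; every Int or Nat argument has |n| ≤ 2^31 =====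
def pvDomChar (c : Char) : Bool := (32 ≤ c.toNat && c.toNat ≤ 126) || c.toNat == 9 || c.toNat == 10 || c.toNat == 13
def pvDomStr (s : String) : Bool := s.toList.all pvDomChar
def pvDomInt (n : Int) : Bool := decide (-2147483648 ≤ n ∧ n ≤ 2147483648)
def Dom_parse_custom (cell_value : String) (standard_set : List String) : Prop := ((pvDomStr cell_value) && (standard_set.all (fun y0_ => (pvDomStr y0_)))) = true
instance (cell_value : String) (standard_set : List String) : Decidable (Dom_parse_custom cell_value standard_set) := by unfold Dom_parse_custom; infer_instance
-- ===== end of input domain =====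

-- B restructures A's scan: it keeps the shrinking list of options that still start with the
-- current candidate ("survivors"), so growing a candidate only rescans the previous survivors,
-- the exact test runs inside them, and the length filter is fused into the flush; same value.

-- ===== PORT A =====
-- A is ported on List Char via PySem.Chars (exact on the ASCII domain).
-- A's 'matched' variable is computed but never used; kept as '_matched'.
def pcStepA (std : List (List Char)) (st : List (List Char) × List Char) (part : List Char) :
    List (List Char) × List Char :=
  let candidate := if st.2 ≠ [] then PySem.Chars.stripChars (st.2 ++ (", ".toList) ++ part) (", ".toList) else part
  let _matched := std.any (fun s =>
      (PySem.Chars.lower s == PySem.Chars.lower candidate) ||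
      PySem.Chars.startswith (PySem.Chars.lower s) (PySem.Chars.lower candidate ++ [',']))
  let in_standard := std.any (fun s => PySem.Chars.lower s == PySem.Chars.lower candidate)
  let partial_match := std.any (fun s => PySem.Chars.startswith (PySem.Chars.lower s) (PySem.Chars.lower candidate))
  if in_standard then (st.1, [])
  else if partial_match then (st.1, candidate)
  else
    let custom := if st.2 ≠ [] then st.1 ++ [st.2] else st.1
    if std.any (fun s => PySem.Chars.lower s == PySem.Chars.lower part) then (custom, [])
    else (custom, part)

def parse_custom (cell_value : String) (standard_set : List String) : List String :=
  if cell_value.toList = [] ∨ PySem.Chars.strip cell_value.toList = [] then []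
  else
    let parts := (PySem.Chars.splitOn cell_value.toList [',']).map PySem.Chars.strip
    let fin := parts.foldl (pcStepA (standard_set.map String.toList)) ([], [])
    let custom := if fin.2 ≠ [] then fin.1 ++ [fin.2] else fin.1
    (custom.filter (fun c => c.length > 2)).map (fun l => String.ofList l)

-- ===== PORT B =====
-- state: (out, cand, live); live = the options still starting with cand
def pcStepB (lows : List (List Char)) (st : List (List Char) × List Char × List (List Char))
    (part : List Char) : List (List Char) × List Char × List (List Char) :=
  let joined := if st.2.1 ≠ [] then PySem.Chars.stripChars (st.2.1 ++ (", ".toList) ++ part) (", ".toList) else part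
  let j := PySem.Chars.lower joined
  let survivors := st.2.2.filter (fun o => PySem.Chars.startswith o j)
  if survivors.contains j then (st.1, [], lows)
  else if survivors ≠ [] then (st.1, joined, survivors)
  else
    let out := if st.2.1.length > 2 then st.1 ++ [st.2.1] else st.1
    if lows.contains (PySem.Chars.lower part) then (out, [], lows)
    else (out, part, lows.filter (fun o => PySem.Chars.startswith o (PySem.Chars.lower part)))

def parse_custom_alt (cell_value : String) (standard_set : List String) : List String :=
  if cell_value.toList = [] ∨ PySem.Chars.strip cell_value.toList = [] then []
  else
    let lows := (standard_set.map String.toList).map PySem.Chars.lower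
    let parts := (PySem.Chars.splitOn cell_value.toList [',']).map PySem.Chars.strip
    let fin := parts.foldl (pcStepB lows) ([], [], lows)
    let out := if fin.2.1.length > 2 then fin.1 ++ [fin.2.1] else fin.1
    out.map (fun l => String.ofList l)

-- ===== PRECONDITION & SPEC =====
def Spec_parse_custom (cell_value : String) (standard_set : List String) (out : List String) : Prop := out = parse_custom_alt cell_value standard_set
instance (cell_value : String) (standard_set : List String) (out : List String) : Decidable (Spec_parse_custom cell_value standard_set out) := by unfold Spec_parse_custom; infer_instance

-- ===== CLAIM (what is proved, stated in full; the proofs are below) =====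
def Claim_equal_parse_custom : Prop := ∀ (cell_value : String) (standard_set : List String), Dom_parse_custom cell_value standard_set → Spec_parse_custom cell_value standard_set (parse_custom cell_value standard_set)

-- ===== LEMMAS AND PROOFS =====

-- a list whose first and last characters are neither ',' nor ' '
def pcClean (l : List Char) : Prop :=
  (∀ a ∈ l.head?, a ≠ ',' ∧ a ≠ ' ') ∧ (∀ a ∈ l.getLast?, a ≠ ',' ∧ a ≠ ' ')

-- the invariant tying A's state (custom, buf) to B's state (out, cand, live)
def pcInv (std : List (List Char)) (stA : List (List Char) × List Char)
    (stB : List (List Char) × List Char × List (List Char)) : Prop :=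
  stB.2.1 = stA.2 ∧
  stB.1 = stA.1.filter (fun c => c.length > 2) ∧
  stB.2.2 = (std.map PySem.Chars.lower).filter
      (fun o => PySem.Chars.startswith o (PySem.Chars.lower stA.2)) ∧
  pcClean stA.2

theorem pc_head?_dropWhile (p : Char → Bool) (l : List Char) (a : Char)
    (h : (l.dropWhile p).head? = some a) : p a = false := by
  have hne : l.dropWhile p ≠ [] := by intro h0; rw [h0] at h; simp at h
  have h1 := List.head_dropWhile_not p hne
  rw [List.head?_eq_some_head hne, Option.some.injEq] at h
  exact h ▸ h1

theorem pc_getLast?_dropWhile (p : Char → Bool) (l : List Char) (h : l.dropWhile p ≠ []) :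
    (l.dropWhile p).getLast? = l.getLast? := by
  obtain ⟨t, ht⟩ := List.dropWhile_suffix p (l := l)
  conv_rhs => rw [← ht]
  rw [List.getLast?_append_of_ne_nil t h]

-- ends of the lstrip-then-rstrip shape both fail p
theorem pc_ends (p : Char → Bool) (s : List Char) :
    (∀ a ∈ ((List.dropWhile p (List.dropWhile p s).reverse).reverse).head?, p a = false) ∧
    (∀ a ∈ ((List.dropWhile p (List.dropWhile p s).reverse).reverse).getLast?, p a = false) := by
  constructor
  · intro a ha
    rw [List.head?_reverse] at ha
    have hne : List.dropWhile p ((List.dropWhile p s).reverse) ≠ [] := by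
      intro h0; rw [h0] at ha; simp at ha
    rw [pc_getLast?_dropWhile p _ hne, List.getLast?_reverse] at ha
    exact pc_head?_dropWhile p _ a ha
  · intro a ha
    rw [List.getLast?_reverse] at ha
    exact pc_head?_dropWhile p _ a ha

theorem pc_clean_stripChars (s : List Char) : pcClean (PySem.Chars.stripChars s (", ".toList)) := by
  have hends := pc_ends (fun c => (", ".toList).contains c) s
  refine ⟨fun a ha => ?_, fun a ha => ?_⟩
  · have h1 := hends.1 a (by simpa [PySem.Chars.stripChars] using ha)
    simpa using h1
  · have h1 := hends.2 a (by simpa [PySem.Chars.stripChars] using ha)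
    simpa using h1

-- pieces of splitOn by ',' contain no ','
theorem pc_go_comma (fuel : ℕ) : ∀ (l cur : List Char) (acc : List (List Char)),
    l.length < fuel → (',' ∉ cur) → (∀ x ∈ acc, ',' ∉ x) →
    ∀ x ∈ PySem.Chars.splitOn.go [','] fuel l cur acc, ',' ∉ x := by
  induction fuel with
  | zero => intro l cur acc hlen; exact absurd hlen (Nat.not_lt_zero _)
  | succ n ih =>
      intro l cur acc hlen hcur hacc x hx
      rw [PySem.Chars.splitOn.go.eq_def] at hx
      cases l with
      | nil =>
          dsimp only at hx
          rw [List.mem_reverse, List.mem_cons] at hx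
          rcases hx with rfl | hx
          · rw [List.mem_reverse]; exact hcur
          · exact hacc x hx
      | cons c rest =>
          dsimp only at hx
          by_cases hpre : ([','] : List Char).isPrefixOf (c :: rest) = true
          · rw [if_pos hpre] at hx
            have hd : List.drop ([','] : List Char).length (c :: rest) = rest := by simp
            rw [hd] at hx
            refine ih rest [] (cur.reverse :: acc) (by simp at hlen ⊢; omega) (by simp) ?_ x hx
            intro y hy
            rcases List.mem_cons.mp hy with rfl | hy
            · rw [List.mem_reverse]; exact hcur
            · exact hacc y hy
          · rw [if_neg hpre] at hx
            have hc : c ≠ ',' := by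
              intro h; subst h
              exact hpre (by simp [List.isPrefixOf])
            refine ih rest (c :: cur) acc (by simp at hlen ⊢; omega) ?_ hacc x hx
            intro h
            rcases List.mem_cons.mp h with h | h
            · exact hc h.symm
            · exact hcur h

theorem pc_parts_clean (cv : List Char) :
    ∀ p ∈ (PySem.Chars.splitOn cv [',']).map PySem.Chars.strip, pcClean p := by
  intro p hp
  rw [List.mem_map] at hp
  obtain ⟨q, hq, rfl⟩ := hp
  have hcomma : ',' ∉ q := by
    have hgo := pc_go_comma (cv.length + 1) cv [] [] (by omega) (by simp) (by simp)
    exact hgo q (by simpa [PySem.Chars.splitOn] using hq)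
  have hsub : ∀ a, a ∈ PySem.Chars.strip q → a ∈ q := by
    intro a ha
    unfold PySem.Chars.strip PySem.Chars.rstrip PySem.Chars.lstrip at ha
    rw [List.mem_reverse] at ha
    have h1 := (List.dropWhile_sublist _).subset ha
    rw [List.mem_reverse] at h1
    exact (List.dropWhile_sublist _).subset h1
  have hends := pc_ends PySem.Chars.isspace q
  refine ⟨fun a ha => ?_, fun a ha => ?_⟩
  · have h1 : PySem.Chars.isspace a = false := hends.1 a
      (by simpa [PySem.Chars.strip, PySem.Chars.rstrip, PySem.Chars.lstrip] using ha)
    have h2 : a ∈ q := hsub a (List.mem_of_mem_head? ha)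
    exact ⟨fun h => hcomma (h ▸ h2), fun h => by rw [h] at h1; exact absurd h1 (by decide)⟩
  · have h1 : PySem.Chars.isspace a = false := hends.2 a
      (by simpa [PySem.Chars.strip, PySem.Chars.rstrip, PySem.Chars.lstrip] using ha)
    have h2 : a ∈ q := hsub a (List.mem_of_mem_getLast? ha)
    exact ⟨fun h => hcomma (h ▸ h2), fun h => by rw [h] at h1; exact absurd h1 (by decide)⟩

-- dropWhile is the identity when the head fails p
theorem pc_dropWhile_eq_self (p : Char → Bool) (l : List Char)
    (h : ∀ a ∈ l.head?, p a = false) : l.dropWhile p = l := by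
  cases l with
  | nil => rfl
  | cons a t =>
      rw [List.dropWhile_cons, if_neg]
      simp only [List.head?_cons, Option.mem_def, Option.some.injEq, forall_eq'] at h
      simp [h]

-- the strip(', ') of 'cand ++ ", " ++ part' in closed form, for clean ends
theorem pc_strip_join (cand part : List Char) (hc : pcClean cand) (hne : cand ≠ [])
    (hp : pcClean part) :
    PySem.Chars.stripChars (cand ++ (", ".toList) ++ part) (", ".toList) =
      if part = [] then cand else cand ++ (", ".toList) ++ part := by
  have hl : (", ".toList) = ([',', ' '] : List Char) := rfl
  rw [hl]
  unfold PySem.Chars.stripChars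
  dsimp only
  have hpf : ∀ a, a ≠ ',' → a ≠ ' ' → ([',', ' '] : List Char).contains a = false := by
    intro a ha1 ha2
    rw [Bool.eq_false_iff]
    intro hcon
    rw [List.contains_iff_mem] at hcon
    simp only [List.mem_cons, List.not_mem_nil, or_false] at hcon
    tauto
  have step1 : List.dropWhile (fun c => ([',', ' '] : List Char).contains c)
      (cand ++ [',', ' '] ++ part) = cand ++ [',', ' '] ++ part := by
    refine pc_dropWhile_eq_self _ _ (fun a ha => ?_)
    rw [List.append_assoc, List.head?_append_of_ne_nil _ hne] at ha
    have := hc.1 a ha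
    exact hpf a this.1 this.2
  rw [step1]
  by_cases hpe : part = []
  · subst hpe
    rw [if_pos rfl]
    have hrev : (cand ++ [',', ' '] ++ ([] : List Char)).reverse = ' ' :: ',' :: cand.reverse := by
      simp
    rw [hrev]
    rw [List.dropWhile_cons, if_pos (by decide), List.dropWhile_cons, if_pos (by decide)]
    rw [pc_dropWhile_eq_self _ _ (fun a ha => ?_), List.reverse_reverse]
    rw [List.head?_reverse] at ha
    have := hc.2 a ha
    exact hpf a this.1 this.2
  · rw [if_neg hpe]
    have hrev : (cand ++ [',', ' '] ++ part).reverse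
        = part.reverse ++ (([',', ' '] : List Char).reverse ++ cand.reverse) := by
      simp
    rw [hrev]
    rw [pc_dropWhile_eq_self _ _ (fun a ha => ?_)]
    · rw [← hrev, List.reverse_reverse]
    · rw [List.head?_append_of_ne_nil _ (by simpa using hpe), List.head?_reverse] at ha
      have := hp.2 a ha
      exact hpf a this.1 this.2

-- pruning: refiltering the survivors by a longer candidate = filtering everything by it
theorem pc_filter_prefix (lows : List (List Char)) (c j : List Char) (h : c <+: j) :
    (lows.filter (fun o => PySem.Chars.startswith o c)).filter
        (fun o => PySem.Chars.startswith o j)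
      = lows.filter (fun o => PySem.Chars.startswith o j) := by
  rw [List.filter_filter]
  refine List.filter_congr (fun o _ => ?_)
  by_cases hj : PySem.Chars.startswith o j = true
  · have hc : PySem.Chars.startswith o c = true :=
      (PySem.Chars.startswith_iff _ _).mpr (h.trans ((PySem.Chars.startswith_iff _ _).mp hj))
    simp [hj, hc]
  · simp [Bool.eq_false_iff.mpr hj]

-- B's exact test inside the survivors = A's equality scan
theorem pc_exact_eq (std : List (List Char)) (j : List Char) :
    ((std.map PySem.Chars.lower).filter (fun o => PySem.Chars.startswith o j)).contains j
      = std.any (fun s => PySem.Chars.lower s == j) := by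
  rw [Bool.eq_iff_iff]
  simp only [List.contains_iff_mem, List.mem_filter, List.mem_map, List.any_eq_true, beq_iff_eq]
  constructor
  · rintro ⟨⟨s, hs, rfl⟩, _⟩; exact ⟨s, hs, rfl⟩
  · rintro ⟨s, hs, rfl⟩
    exact ⟨⟨s, hs, rfl⟩, (PySem.Chars.startswith_iff _ _).mpr (List.prefix_refl _)⟩

-- B's nonempty-survivors test = A's startswith scan
theorem pc_partial_iff (std : List (List Char)) (j : List Char) :
    (std.map PySem.Chars.lower).filter (fun o => PySem.Chars.startswith o j) ≠ [] ↔
      std.any (fun s => PySem.Chars.startswith (PySem.Chars.lower s) j) = true := by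
  rw [ne_eq, List.filter_eq_nil_iff]
  simp only [List.mem_map, List.any_eq_true, not_forall]
  constructor
  · rintro ⟨o, ⟨⟨s, hs, rfl⟩, h⟩⟩; exact ⟨s, hs, by simpa using h⟩
  · rintro ⟨s, hs, h⟩; exact ⟨_, ⟨s, hs, rfl⟩, by simpa using h⟩

-- B's membership test for a bare part = A's equality scan
theorem pc_mem_lows (std : List (List Char)) (x : List Char) :
    (std.map PySem.Chars.lower).contains x = std.any (fun s => PySem.Chars.lower s == x) := by
  rw [Bool.eq_iff_iff]
  simp only [List.contains_iff_mem, List.mem_map, List.any_eq_true, beq_iff_eq]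

-- filtering by the empty candidate keeps everything
theorem pc_filter_nil (lows : List (List Char)) :
    lows.filter (fun o => PySem.Chars.startswith o (PySem.Chars.lower [])) = lows :=
  List.filter_eq_self.mpr (fun o _ => by simp [PySem.Chars.startswith, PySem.Chars.lower])

-- A's flush-then-filter = B's filter-at-flush
theorem pc_flush (customA : List (List Char)) (buf : List Char) :
    (if buf ≠ [] then customA ++ [buf] else customA).filter (fun c => c.length > 2)
      = if buf.length > 2 then customA.filter (fun c => c.length > 2) ++ [buf]
        else customA.filter (fun c => c.length > 2) := by
  by_cases hb : buf = []
  · subst hb; simp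
  · rw [if_pos hb, List.filter_append]
    by_cases hl : buf.length > 2
    · simp [hl]
    · simp [hl]

-- one step preserves the invariant
theorem pc_step (std : List (List Char)) (stA : List (List Char) × List Char)
    (stB : List (List Char) × List Char × List (List Char)) (part : List Char)
    (hI : pcInv std stA stB) (hp : pcClean part) :
    pcInv std (pcStepA std stA part) (pcStepB (std.map PySem.Chars.lower) stB part) := by
  obtain ⟨customA, buf⟩ := stA
  obtain ⟨outB, cand, live⟩ := stB
  obtain ⟨h1, h2, h3, h4⟩ := hI
  dsimp only at h1 h2 h3 h4
  subst h1 h2 h3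
  unfold pcStepA pcStepB pcInv
  dsimp only
  set candidate := if cand ≠ [] then PySem.Chars.stripChars (cand ++ (", ".toList) ++ part) (", ".toList) else part with hcanddef
  have hclean : pcClean candidate := by
    by_cases hb : cand = []
    · simpa [hcanddef, hb] using hp
    · rw [hcanddef, if_pos hb]; exact pc_clean_stripChars _
  have hpref : cand <+: candidate := by
    by_cases hb : cand = []
    · simp [hb]
    · rw [hcanddef, if_pos hb, pc_strip_join cand part h4 hb hp]
      by_cases hpe : part = []
      · simp [hpe]
      · rw [if_neg hpe]; exact ⟨(", ".toList) ++ part, by simp⟩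
  have hlow : PySem.Chars.lower cand <+: PySem.Chars.lower candidate := by
    unfold PySem.Chars.lower; exact hpref.map _
  rw [pc_filter_prefix (std.map PySem.Chars.lower) _ _ hlow, pc_exact_eq]
  by_cases hin : std.any (fun s => PySem.Chars.lower s == PySem.Chars.lower candidate) = true
  · rw [if_pos hin, if_pos hin]
    exact ⟨rfl, rfl, (pc_filter_nil _).symm, by simp [pcClean]⟩
  · rw [if_neg hin, if_neg hin]
    by_cases hpm : std.any (fun s => PySem.Chars.startswith (PySem.Chars.lower s) (PySem.Chars.lower candidate)) = true
    · rw [if_pos hpm, if_pos ((pc_partial_iff std _).mpr hpm)]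
      exact ⟨rfl, rfl, rfl, hclean⟩
    · rw [if_neg hpm, if_neg (fun hcon => hpm ((pc_partial_iff std _).mp hcon))]
      rw [pc_mem_lows]
      by_cases hpx : std.any (fun s => PySem.Chars.lower s == PySem.Chars.lower part) = true
      · rw [if_pos hpx, if_pos hpx]
        exact ⟨rfl, (pc_flush customA cand).symm, (pc_filter_nil _).symm, by simp [pcClean]⟩
      · rw [if_neg hpx, if_neg hpx]
        exact ⟨rfl, (pc_flush customA cand).symm, rfl, hp⟩

theorem pc_fold (std : List (List Char)) (parts : List (List Char))
    (hps : ∀ p ∈ parts, pcClean p) :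
    ∀ stA stB, pcInv std stA stB →
      pcInv std (parts.foldl (pcStepA std) stA)
        (parts.foldl (pcStepB (std.map PySem.Chars.lower)) stB) := by
  induction parts with
  | nil => intro stA stB h; simpa using h
  | cons p t ih =>
      intro stA stB h
      simp only [List.foldl_cons]
      exact ih (fun q hq => hps q (List.mem_cons_of_mem _ hq)) _ _
        (pc_step std stA stB p h (hps p List.mem_cons_self))

-- ===== VERDICT (by name: the statement is the Claim_ definition above) =====
theorem parse_custom_spec : Claim_equal_parse_custom := by
  intro cell_value standard_set _
  unfold Spec_parse_custom parse_custom parse_custom_alt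
  by_cases hguard : cell_value.toList = [] ∨ PySem.Chars.strip cell_value.toList = []
  · rw [if_pos hguard, if_pos hguard]
  · rw [if_neg hguard, if_neg hguard]
    dsimp only
    have h0 : pcInv (standard_set.map String.toList) ([], [])
        ([], [], (standard_set.map String.toList).map PySem.Chars.lower) := by
      refine ⟨rfl, rfl, ?_, by simp [pcClean]⟩
      rw [eq_comm]
      refine List.filter_eq_self.mpr (fun o _ => ?_)
      simp [PySem.Chars.startswith, PySem.Chars.lower]
    have hinv := pc_fold (standard_set.map String.toList) _
      (pc_parts_clean cell_value.toList) ([], [])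
      ([], [], (standard_set.map String.toList).map PySem.Chars.lower) h0
    set finA := ((PySem.Chars.splitOn cell_value.toList [',']).map PySem.Chars.strip).foldl
      (pcStepA (standard_set.map String.toList)) ([], []) with hfa
    set finB := ((PySem.Chars.splitOn cell_value.toList [',']).map PySem.Chars.strip).foldl
      (pcStepB ((standard_set.map String.toList).map PySem.Chars.lower)) ([], [],
        (standard_set.map String.toList).map PySem.Chars.lower) with hfb
    obtain ⟨h1, h2, _, _⟩ := hinv
    congr 1
    rw [h1, h2, pc_flush]
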